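-- pv_equiv track=rewrite | github.com/avani-ops/Assignement-1- | Final Project/Final_Project.py | get_artist_array
-- ===== SOURCE A (Python) =====
-- def get_artist_array(record):
--     get_record = record.split("\n")
--     data = "Not Available"
--     for i in range(0,len(get_record),1):
--         if(get_record[i].find("ARTIST") > 0):
--             start = get_record[i].find(">") + 1
--             end  = get_record[i].find("</ARTIST>")
--             data = get_record[i][start:end]
--     return data
-- ===== SOURCE B (Python) =====
-- def get_artist_array(record):
--     lines = record.split("\n")
--     i = len(lines) - 1
--     while i >= 0:
--         line = lines[i]
--         if line.find("ARTIST") > 0: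
--             return line[line.find(">") + 1:line.find("</ARTIST>")]
--         i -= 1
--     return "Not Available"
-- ===== Notes on version B (the rewrite author's own statement) =====
-- stated objective: alternative
-- what changed: A scans all lines front-to-back, re-extracting and overwriting on every matching line; B walks the lines back-to-front by index and returns immediately on the first match, so it never visits earlier lines or performs more than one extraction.
import Mathlib
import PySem

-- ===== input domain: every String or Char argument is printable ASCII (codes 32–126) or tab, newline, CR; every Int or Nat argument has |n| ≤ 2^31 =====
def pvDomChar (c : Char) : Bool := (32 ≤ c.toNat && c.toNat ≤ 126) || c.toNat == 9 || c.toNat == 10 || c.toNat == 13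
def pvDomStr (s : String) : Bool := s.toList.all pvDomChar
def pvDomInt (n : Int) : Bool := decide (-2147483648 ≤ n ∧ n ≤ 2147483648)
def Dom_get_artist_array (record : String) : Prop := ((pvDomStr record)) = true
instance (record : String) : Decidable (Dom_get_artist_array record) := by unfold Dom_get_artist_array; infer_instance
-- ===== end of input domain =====

-- B walks the lines back-to-front by index and returns on the first match (one extraction at most),
-- instead of A's forward overwrite-on-every-match loop; objective: alternative (same worst-case cost).


-- ===== PORT A =====
-- record.split("\n"): the separator is the non-empty literal "\n", so split? is always `some`;
-- the `.getD []` default is never used.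
def get_artist_array (record : String) : String :=
  (PySem.List.pyRange 0 (PySem.List.len ((PySem.Str.split? record "\n").getD [])) 1).foldl
    (fun data i =>
      if PySem.Str.find (PySem.List.pyGetD ((PySem.Str.split? record "\n").getD []) i "") "ARTIST" > 0 then
        PySem.Str.slice (PySem.List.pyGetD ((PySem.Str.split? record "\n").getD []) i "")
          (some (PySem.Str.find (PySem.List.pyGetD ((PySem.Str.split? record "\n").getD []) i "") ">" + 1))
          (some (PySem.Str.find (PySem.List.pyGetD ((PySem.Str.split? record "\n").getD []) i "") "</ARTIST>"))
      else data)
    "Not Available"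

-- ===== PORT B =====
-- Source B's `while i >= 0` loop with `i` counting down from len(lines)-1; the recursion argument is
-- i+1 (0 means the loop has terminated without a match).
def pvScanBack (lines : List String) : Nat → String
  | 0 => "Not Available"
  | Nat.succ i =>
      let line := PySem.List.pyGetD lines (Int.ofNat i) ""
      if PySem.Str.find line "ARTIST" > 0 then
        PySem.Str.slice line (some (PySem.Str.find line ">" + 1))
          (some (PySem.Str.find line "</ARTIST>"))
      else pvScanBack lines i

def get_artist_array_alt (record : String) : String :=
  let lines := (PySem.Str.split? record "\n").getD []
  pvScanBack lines lines.length

-- ===== PRECONDITION & SPEC =====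
def Spec_get_artist_array (record : String) (out : String) : Prop := out = get_artist_array_alt record
instance (record : String) (out : String) : Decidable (Spec_get_artist_array record out) := by unfold Spec_get_artist_array; infer_instance

-- ===== CLAIM (what is proved, stated in full; the proofs are below) =====
def Claim_equal_get_artist_array : Prop := ∀ (record : String), Dom_get_artist_array record → Spec_get_artist_array record (get_artist_array record)

-- ===== LEMMAS AND PROOFS =====

-- A's overwrite-on-match loop computes the extraction of the LAST line passing the test (or the
-- initial value when none passes), stated over any list, test and extraction.
theorem foldl_last_match {α β : Type} (p : α → Prop) [DecidablePred p] (f : α → β) :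
    ∀ (xs : List α) (d : β),
      xs.foldl (fun data x => if p x then f x else data) d =
        match (xs.filter (fun x => decide (p x))).getLast? with
        | none => d
        | some x => f x := by
  intro xs
  induction xs with
  | nil => intro d; rfl
  | cons x xs ih =>
    intro d
    simp only [List.foldl_cons, List.filter_cons]
    rw [ih]
    by_cases hp : p x
    · simp only [hp, decide_true, if_true]
      cases h : (xs.filter (fun x => decide (p x))).getLast? with
      | none =>
        have : xs.filter (fun x => decide (p x)) = [] := List.getLast?_eq_none_iff.mp h
        simp [this]
      | some y => simp [List.getLast?_cons, h]
    · simp only [hp, decide_false, if_false]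
      rfl

-- B's backward scan over the first n lines returns the extraction of the last line among the
-- first n that passes the test (first match seen from the end).
theorem pvScanBack_eq_last_match (lines : List String) :
    ∀ n, n ≤ lines.length →
      pvScanBack lines n =
        match ((lines.take n).filter
            (fun line => decide (PySem.Str.find line "ARTIST" > 0))).getLast? with
        | none => "Not Available"
        | some line =>
            PySem.Str.slice line (some (PySem.Str.find line ">" + 1))
              (some (PySem.Str.find line "</ARTIST>")) := by
  intro n
  induction n with
  | zero => intro _; rfl
  | succ i ih =>
    intro hle
    have hi : i < lines.length := Nat.lt_of_succ_le hle
    have hget : PySem.List.pyGetD lines (Int.ofNat i) "" = lines[i] := by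
      rw [show (Int.ofNat i) = ((i : Nat) : Int) from rfl, PySem.List.pyGetD_natCast]
      simp [List.getD_eq_getElem?_getD, hi]
    have htake : lines.take (i + 1) = lines.take i ++ [lines[i]] :=
      List.take_succ_eq_append_getElem hi
    simp only [pvScanBack, hget]
    rw [ih (Nat.le_of_lt hi), htake, List.filter_append, List.filter_cons, List.filter_nil]
    by_cases hp : PySem.Str.find lines[i] "ARTIST" > 0
    · rw [if_pos hp]
      simp only [hp, decide_true, if_true]
      rw [List.getLast?_append]
      rfl
    · rw [if_neg hp]
      simp only [hp, decide_false, Bool.false_eq_true, if_false, List.append_nil]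

-- ===== VERDICT (by name: the statement is the Claim_ definition above) =====
theorem get_artist_array_spec : Claim_equal_get_artist_array := by
  intro record _
  unfold Spec_get_artist_array get_artist_array get_artist_array_alt
  generalize (PySem.Str.split? record "\n").getD [] = xs
  refine Eq.trans
    (PySem.List.foldl_pyRange_pyGetD xs ""
      (fun data line =>
        if PySem.Str.find line "ARTIST" > 0 then
          PySem.Str.slice line (some (PySem.Str.find line ">" + 1))
            (some (PySem.Str.find line "</ARTIST>"))
        else data)
      "Not Available" (a := 0) (by omega)) ?_
  simp only [Int.toNat_zero, List.drop_zero]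
  rw [foldl_last_match (fun line => PySem.Str.find line "ARTIST" > 0)
    (fun line => PySem.Str.slice line (some (PySem.Str.find line ">" + 1))
      (some (PySem.Str.find line "</ARTIST>"))) xs "Not Available"]
  rw [pvScanBack_eq_last_match xs xs.length (Nat.le_refl _), List.take_length]
  cases (List.filter (fun line => decide (PySem.Str.find line "ARTIST" > 0)) xs).getLast? with
  | none => rfl
  | some line => rfl
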